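-- pv_equiv track=rewrite | github.com/paper-hacker-behaviour/code_base | classify_user_behaviour.py | classify_inactivity_leading
-- ===== SOURCE A (Python) =====
-- def classify_inactivity_leading(user_data_list):
--     """
--     This classifies any intervals before the initial submission
--     (and searching period if applicable) as "Initial inactivity"
--
--     Parameters
--     ----------
--     user_data_list : list of arrays
--         user data - submission states must be classified.
--
--     Returns
--     -------
--     classified_data : list of arrays
--         user data - with any neccessary "initial inactivity" states added.
--     """
--
--     classified_data = user_data_list
--
--     for i in range(len(user_data_list)):
--         #Find the first classified index in the user data
--         initial_index = -1
--         for j in range(len(user_data_list[i])):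
--             #Check to see if interval has been previously classified
--             if user_data_list[i][j] > -1:
--                 #If classified, save index and exit loop
--                 initial_index = j
--                 break
--
--
--         #If the first state is classified OR error, move to the next user
--         if initial_index == 0 or initial_index == -1:
--             continue
--
--         #Classify all neccessary intervals as being initially inactive
--         for j in range(initial_index):
--             classified_data[i][j] = 0
--
--     return classified_data
-- ===== SOURCE B (Python) =====
-- def classify_inactivity_leading(user_data_list):
--     # Different algorithm: per-element rule instead of find-then-fill.
--     # An element becomes 0 iff every element before it is unclassified (<= -1)
--     # and some element at-or-after it is classified (> -1).  Computed with one
--     # backward pass (suffix-has-classified flags) and one forward pass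
--     # (prefix-all-unclassified flag).  Mutates the arrays in place like A.
--     for arr in user_data_list:
--         n = len(arr)
--         suffix_has = [False] * n
--         seen = False
--         for j in range(n - 1, -1, -1):
--             seen = seen or arr[j] > -1
--             suffix_has[j] = seen
--         prefix_blank = True
--         for j in range(n):
--             if arr[j] > -1:
--                 prefix_blank = False
--             if prefix_blank and suffix_has[j]:
--                 arr[j] = 0
--     return user_data_list
-- ===== Notes on version B (the rewrite author's own statement) =====
-- stated objective: alternative
-- what changed: Replaced A's find-first-classified-index-then-fill strategy with a per-element rule (an entry becomes 0 iff everything before it is <= -1 and something at or after it is > -1), evaluated by a backward pass computing suffix-has-classified flags and a forward pass tracking a prefix-all-unclassified flag.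
import Mathlib
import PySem

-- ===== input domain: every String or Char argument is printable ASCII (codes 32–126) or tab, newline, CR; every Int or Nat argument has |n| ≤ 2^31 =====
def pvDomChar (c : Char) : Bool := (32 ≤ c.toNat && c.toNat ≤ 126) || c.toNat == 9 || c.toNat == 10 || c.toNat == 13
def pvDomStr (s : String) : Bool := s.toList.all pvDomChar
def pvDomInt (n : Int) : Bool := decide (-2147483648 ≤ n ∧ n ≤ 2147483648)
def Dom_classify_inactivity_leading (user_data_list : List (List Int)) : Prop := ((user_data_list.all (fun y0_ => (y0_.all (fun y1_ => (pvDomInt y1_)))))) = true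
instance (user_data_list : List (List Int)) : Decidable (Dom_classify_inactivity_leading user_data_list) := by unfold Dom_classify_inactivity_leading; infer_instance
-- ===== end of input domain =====

-- B replaces A's find-first-index-then-fill by a per-element rule (zero iff all earlier entries <= -1 and some entry at-or-after is > -1), via a backward suffix-flag pass and a forward prefix-flag pass; A mutates the rows in place, the equivalence is about the returned value.

-- ===== PORT A =====
-- inner loop: find the first index j with row[j] > -1, else -1
def pvA_find : List Int → Nat → Int
  | [], _ => -1
  | x :: xs, j => if x > -1 then (j : Int) else pvA_find xs (j + 1)

-- 'for j in range(initial_index): classified_data[i][j] = 0'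
def pvA_fill (row : List Int) : Nat → List Int
  | 0 => row
  | n + 1 => (pvA_fill row n).set n 0

def pvA_row (row : List Int) : List Int :=
  let initial_index := pvA_find row 0
  if initial_index = 0 ∨ initial_index = -1 then row
  else pvA_fill row initial_index.toNat

def classify_inactivity_leading (user_data_list : List (List Int)) : List (List Int) :=
  user_data_list.map pvA_row

-- ===== PORT B =====
-- backward pass: suffix_has[j] = some value at index >= j is classified; also returns 'seen'
def pvB_suffix : List Int → List Bool × Bool
  | [] => ([], false)
  | x :: xs =>
      let (l, s) := pvB_suffix xs
      let s' := s || decide (x > -1)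
      (s' :: l, s')

-- forward pass with the prefix-all-unclassified flag
def pvB_forward : List Int → List Bool → Bool → List Int
  | [], _, _ => []
  | x :: xs, [], _ => x :: xs    -- unreachable: the flag list has the row's length
  | x :: xs, h :: hs, pb =>
      let pb' := if x > -1 then false else pb
      (if pb' && h then 0 else x) :: pvB_forward xs hs pb'

def pvB_row (row : List Int) : List Int :=
  pvB_forward row (pvB_suffix row).1 true

def classify_inactivity_leading_alt (user_data_list : List (List Int)) : List (List Int) :=
  user_data_list.map pvB_row

-- ===== PRECONDITION & SPEC =====
def Spec_classify_inactivity_leading (user_data_list : List (List Int)) (out : List (List Int)) : Prop := out = classify_inactivity_leading_alt user_data_list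
instance (user_data_list : List (List Int)) (out : List (List Int)) : Decidable (Spec_classify_inactivity_leading user_data_list out) := by unfold Spec_classify_inactivity_leading; infer_instance

-- ===== CLAIM =====
def Claim_equal_classify_inactivity_leading : Prop := ∀ (user_data_list : List (List Int)), Dom_classify_inactivity_leading user_data_list → Spec_classify_inactivity_leading user_data_list (classify_inactivity_leading user_data_list)

-- ===== LEMMAS AND PROOFS =====

theorem pvA_find_char (row : List Int) (j : Nat) :
    pvA_find row j =
      if row.all (fun x => decide (x ≤ -1)) then -1
      else (j : Int) + ((row.takeWhile (fun x => decide (x ≤ -1))).length : Int) := by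
  induction row generalizing j with
  | nil => simp [pvA_find]
  | cons x xs ih =>
      by_cases hx : x > -1
      · have hx' : ¬ (x ≤ -1) := by omega
        simp [pvA_find, hx, hx']
      · have hx' : x ≤ -1 := by omega
        simp [pvA_find, hx, hx', ih]
        split_ifs with h
        · rfl
        · ring

theorem pvA_fill_char (n : Nat) (row : List Int) (h : n ≤ row.length) :
    pvA_fill row n = List.replicate n (0 : Int) ++ row.drop n := by
  induction n with
  | zero => simp [pvA_fill]
  | succ n ih =>
      have hn : n < row.length := by omega
      have hdrop : row.drop n = row[n]! :: row.drop (n + 1) := by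
        rw [List.drop_eq_getElem_cons hn]
        simp [List.getElem!_eq_getElem?_getD, List.getElem?_eq_getElem hn]
      rw [pvA_fill, ih (by omega), hdrop]
      rw [List.set_append]
      rw [List.replicate_succ' (n := n) (a := (0 : Int))]
      simp

theorem pvB_suffix_snd (row : List Int) :
    (pvB_suffix row).2 = row.any (fun x => decide (x > -1)) := by
  induction row with
  | nil => simp [pvB_suffix]
  | cons x xs ih => simp [pvB_suffix, ih, Bool.or_comm]

theorem pvB_forward_false (row : List Int) (hs : List Bool) :
    pvB_forward row hs false = row := by
  induction row generalizing hs with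
  | nil => simp [pvB_forward]
  | cons x xs ih =>
      cases hs with
      | nil => simp [pvB_forward]
      | cons h hs => simp [pvB_forward, ih]

theorem pvB_row_char (row : List Int) :
    pvB_row row =
      if row.all (fun x => decide (x ≤ -1)) then row
      else List.replicate (row.takeWhile (fun x => decide (x ≤ -1))).length (0 : Int)
            ++ row.drop (row.takeWhile (fun x => decide (x ≤ -1))).length := by
  induction row with
  | nil => simp [pvB_row, pvB_forward]
  | cons x xs ih =>
      by_cases hx : x > -1
      · have hx' : ¬ (x ≤ -1) := by omega
        simp only [pvB_row, pvB_suffix, List.takeWhile_cons, List.all_cons]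
        simp [pvB_forward, hx, hx', pvB_forward_false]
      · have hx' : x ≤ -1 := by omega
        have hs' : (pvB_suffix xs).2 || decide (x > -1) = (pvB_suffix xs).2 := by
          simp [hx]
        simp only [pvB_row] at ih
        simp only [pvB_row, pvB_suffix, List.takeWhile_cons, List.all_cons]
        rw [pvB_forward]
        simp only [if_neg (by omega : ¬ x > -1)]
        rw [pvB_suffix_snd] at hs'
        by_cases hseen : xs.any (fun x => decide (x > -1)) = true
        · have hall : xs.all (fun x => decide (x ≤ -1)) = false := by
            rcases List.any_eq_true.mp hseen with ⟨y, hy, hy'⟩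
            refine List.all_eq_false.mpr ⟨y, hy, ?_⟩
            simp at hy' ⊢; omega
          rw [pvB_suffix_snd, hseen]
          simp only [hall, Bool.false_eq_true, if_false] at ih
          simp [hx', hall, ih, List.replicate_succ]
        · have hseen' : xs.any (fun x => decide (x > -1)) = false := by
            simpa using hseen
          have hall : xs.all (fun x => decide (x ≤ -1)) = true := by
            refine List.all_eq_true.mpr fun y hy => ?_
            have := List.any_eq_false.mp hseen' y hy
            simp at this ⊢; omega
          rw [pvB_suffix_snd, hseen']
          simp only [hall, if_true] at ih
          simp [hx', hall, ih]

theorem pv_row_eq (row : List Int) : pvA_row row = pvB_row row := by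
  rw [pvB_row_char]
  unfold pvA_row
  rw [pvA_find_char]
  by_cases hall : row.all (fun x => decide (x ≤ -1)) = true
  · simp [hall]
  · have hc : row.all (fun x => decide (x ≤ -1)) = false := by simpa using hall
    simp only [hc, Bool.false_eq_true, if_false]
    set k := (row.takeWhile (fun x => decide (x ≤ -1))).length with hk
    have hkle : k ≤ row.length := by
      rw [hk]; exact (List.takeWhile_prefix _).length_le
    by_cases hk0 : k = 0
    · simp [hk0]
    · have hne0 : (((0 : Nat) : Int) + (k : Int)) ≠ 0 := by push_cast; omega
      have hnem1 : (((0 : Nat) : Int) + (k : Int)) ≠ -1 := by push_cast; omega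
      rw [if_neg (not_or.mpr ⟨hne0, hnem1⟩)]
      have htoNat : (((0 : Nat) : Int) + (k : Int)).toNat = k := by push_cast; omega
      rw [htoNat, pvA_fill_char k row hkle]

-- ===== VERDICT =====
theorem classify_inactivity_leading_spec : Claim_equal_classify_inactivity_leading := by
  intro l _
  unfold Spec_classify_inactivity_leading classify_inactivity_leading classify_inactivity_leading_alt
  exact List.map_congr_left (fun row _ => pv_row_eq row)
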